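-- pv_equiv track=rewrite | github.com/hlastras/competitive_programming | adventofcode/2022/day16/part1v6.py | find_max_pressure
-- ===== SOURCE A (Python) =====
-- from heapq import heappush, heappop
--
-- def find_max_pressure(graph, flow_rates):
--     max_time = 30
--     best_pressure = 0
--     queue = [(-0, 'AA', 0, set())]  # Initial state
--
--     while queue:
--         pressure, current_valve, time, visited = heappop(queue)
--         pressure = -pressure
--
--         if time >= max_time:
--             best_pressure = max(best_pressure, pressure)
--             continue
--
--         for next_valve in graph.get(current_valve, []):  # Safe access to graph
--             if next_valve not in visited:
--                 new_visited = visited.copy()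
--                 new_visited.add(next_valve)
--                 new_pressure = pressure + (max_time - time - 1) * flow_rates[next_valve]
--                 heappush(queue, (-new_pressure, next_valve, time + 2, new_visited))
--
--     return best_pressure
-- ===== SOURCE B (Python) =====
-- def find_max_pressure(graph, flow_rates):
--     max_time = 30
--
--     def dfs(valve, time, visited):
--         # best additional pressure obtainable from this state; None if no
--         # continuation of this branch reaches max_time
--         if time >= max_time:
--             return 0
--         best = None
--         for w in graph.get(valve, []):
--             if w not in visited:
--                 visited.add(w)
--                 sub = dfs(w, time + 2, visited)
--                 visited.remove(w)
--                 if sub is not None: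
--                     cand = (max_time - time - 1) * flow_rates[w] + sub
--                     if best is None or cand > best:
--                         best = cand
--         return best
--
--     r = dfs('AA', 0, set())
--     return max(0, r) if r is not None else 0
-- ===== Notes on version B (the rewrite author's own statement) =====
-- stated objective: alternative
-- what changed: Replaces A's best-first search (a heap of whole states, each push copying the visited set, each terminal pop updating a running best) by a plain recursive DFS with a single backtracking visited set that returns the best completion value bottom-up; both explore the same simple paths, so the cost is comparable (measured equal).
import Mathlib
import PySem

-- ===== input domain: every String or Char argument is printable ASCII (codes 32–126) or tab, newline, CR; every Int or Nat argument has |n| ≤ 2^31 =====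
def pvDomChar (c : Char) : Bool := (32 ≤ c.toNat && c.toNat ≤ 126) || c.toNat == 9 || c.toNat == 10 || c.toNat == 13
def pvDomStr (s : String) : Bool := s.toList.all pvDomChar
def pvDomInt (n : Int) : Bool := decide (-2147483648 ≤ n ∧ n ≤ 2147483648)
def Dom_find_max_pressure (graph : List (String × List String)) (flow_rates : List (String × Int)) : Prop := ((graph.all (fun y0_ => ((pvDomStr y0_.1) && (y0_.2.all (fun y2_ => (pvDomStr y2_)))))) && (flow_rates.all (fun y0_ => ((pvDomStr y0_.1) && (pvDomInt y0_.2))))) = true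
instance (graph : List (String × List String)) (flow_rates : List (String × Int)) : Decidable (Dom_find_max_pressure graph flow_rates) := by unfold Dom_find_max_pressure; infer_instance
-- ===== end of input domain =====

-- B replaces A's heap-driven best-first search (whole states on a priority queue, a
-- visited-set copy per push) by a plain recursive DFS with one backtracking visited set
-- returning the best completion value bottom-up; equal on all inputs satisfying Pre_.

-- ===== PORT A =====
-- A queue state: (-pressure, valve, time, visited), exactly Python's heap tuples.
abbrev PvSt := Int × String × Int × PySem.Set String

-- The heap is modeled as a list kept sorted by the tuple key (-pressure, valve, time);
-- heappop = take the head.  CPython's binary heap may pop states with EQUAL keys in a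
-- different order; the equivalence proof below rests on an order-insensitive invariant
-- (the result is a max over terminal states), so the returned value is the same.
def pvStLE (a b : PvSt) : Bool :=
  if a.1 < b.1 then true else if b.1 < a.1 then false
  else if a.2.1 < b.2.1 then true else if b.2.1 < a.2.1 then false
  else decide (a.2.2.1 ≤ b.2.2.1)

-- heappush: insert into the sorted list
def pvHeapPush (q : List PvSt) (s : PvSt) : List PvSt :=
  match q with
  | [] => [s]
  | x :: xs => if pvStLE s x then s :: x :: xs else x :: pvHeapPush xs s

-- Python's inner for-loop: 'for next_valve in graph.get(current_valve, []): if next_valve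
-- not in visited: … heappush(queue, (-new_pressure, next_valve, time + 2, new_visited))'
-- (p is the already-un-negated pressure; flow_rates[w] is getD 0, exact under Pre_).
def pvPushChildren (flow : List (String × Int)) (p : Int) (t : Int)
    (vis : PySem.Set String) (ws : List String) (q : List PvSt) : List PvSt :=
  ws.foldl (fun q w =>
    if PySem.Set.contains vis w then q
    else pvHeapPush q (-(p + (30 - t - 1) * ((PySem.Dict.mk flow).getD w 0)), w, t + 2,
                       PySem.Set.add vis w)) q

-- termination bookkeeping (proof-only, not part of the algorithm): each state with time t
-- can spawn at most pvM graph children, each of strictly smaller potential pvDepth.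
def pvDepth (t : Int) : Nat := if 30 ≤ t then 0 else ((32 - t).toNat) / 2
def pvW (M : Nat) (s : PvSt) : Nat := (M + 1) ^ pvDepth s.2.2.1
def pvQW (M : Nat) (q : List PvSt) : Nat := (q.map (pvW M)).sum
def pvM (graph : List (String × List String)) : Nat := (graph.map (fun kv => kv.2.length)).sum

theorem pvQW_push (M : Nat) (q : List PvSt) (s : PvSt) :
    pvQW M (pvHeapPush q s) = pvW M s + pvQW M q := by
  induction q with
  | nil => simp [pvHeapPush, pvQW]
  | cons x xs ih =>
    simp only [pvHeapPush]
    split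
    · simp [pvQW]
    · simp only [pvQW, List.map_cons, List.sum_cons] at ih ⊢; omega

theorem pvAdj_le (graph : List (String × List String)) (v : String) :
    (((PySem.Dict.mk graph).get? v).getD []).length ≤ pvM graph := by
  induction graph with
  | nil => simp [PySem.Dict.get?, pvM]
  | cons kv rest ih =>
    rw [PySem.Dict.get?_mk_cons]
    simp only [pvM, List.map_cons, List.sum_cons] at ih ⊢
    split
    · simp
    · omega

theorem pvQW_pushChildren_le (flow : List (String × Int)) (M : Nat) (p t : Int)
    (vis : PySem.Set String) (ws : List String) (q : List PvSt) :
    pvQW M (pvPushChildren flow p t vis ws q) ≤ pvQW M q + ws.length * (M + 1) ^ pvDepth (t + 2) := by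
  induction ws generalizing q with
  | nil => simp [pvPushChildren]
  | cons w rest ih =>
    simp only [pvPushChildren, List.foldl_cons, List.length_cons]
    split
    · calc pvQW M (pvPushChildren flow p t vis rest q) ≤ _ := ih q
        _ ≤ _ := by have := Nat.le_add_left 0 ((M + 1) ^ pvDepth (t + 2)); nlinarith [Nat.zero_le ((M + 1) ^ pvDepth (t + 2))]
    · have h := ih (pvHeapPush q (-(p + (30 - t - 1) * ((PySem.Dict.mk flow).getD w 0)), w, t + 2, PySem.Set.add vis w))
      rw [pvQW_push] at h
      simp only [pvW] at h
      calc _ ≤ _ := h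
        _ ≤ _ := by ring_nf; omega

theorem pvDepth_succ2 (t : Int) (h : ¬ 30 ≤ t) :
    1 ≤ pvDepth t ∧ pvDepth (t + 2) ≤ pvDepth t - 1 := by
  simp only [pvDepth]
  split <;> split <;> omega

-- the while-loop: pop the head, either record a terminal pressure or push all children
def pvLoopA (graph : List (String × List String)) (flow : List (String × Int))
    (best : Int) (queue : List PvSt) : Int :=
  match queue with
  | [] => best
  | (negp, v, t, vis) :: rest =>
    if 30 ≤ t then
      pvLoopA graph flow (max best (-negp)) rest
    else
      pvLoopA graph flow best
        (pvPushChildren flow (-negp) t vis (((PySem.Dict.mk graph).get? v).getD []) rest)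
termination_by pvQW (pvM graph) queue
decreasing_by
  · simp only [pvQW, List.map_cons, List.sum_cons]
    have : 0 < pvW (pvM graph) (negp, v, t, vis) := Nat.pow_pos (Nat.succ_pos _)
    omega
  · rename_i h
    have hd := pvDepth_succ2 t h
    obtain ⟨k, hk⟩ : ∃ k, pvDepth t = k + 1 := ⟨pvDepth t - 1, by omega⟩
    have h1 := pvQW_pushChildren_le flow (pvM graph) (-negp) t vis
      (((PySem.Dict.mk graph).get? v).getD []) rest
    have h2 := pvAdj_le graph v
    have h3 : (pvM graph + 1) ^ pvDepth (t + 2) ≤ (pvM graph + 1) ^ k :=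
      Nat.pow_le_pow_right (Nat.succ_pos _) (by omega)
    have hp : 0 < (pvM graph + 1) ^ k := Nat.pow_pos (Nat.succ_pos _)
    have h4 : (pvM graph) * (pvM graph + 1) ^ k < (pvM graph + 1) ^ pvDepth t := by
      rw [hk, pow_succ]
      nlinarith
    have h5 : (((PySem.Dict.mk graph).get? v).getD []).length * (pvM graph + 1) ^ pvDepth (t + 2)
        ≤ (pvM graph) * (pvM graph + 1) ^ k :=
      Nat.mul_le_mul h2 h3
    simp only [pvQW, List.map_cons, List.sum_cons, pvW] at h1 ⊢
    omega

def find_max_pressure (graph : List (String × List String)) (flow_rates : List (String × Int)) : Int :=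
  pvLoopA graph flow_rates 0 [(0, "AA", 0, PySem.Set.empty)]

-- ===== PORT B =====
mutual
-- dfs(valve, time, visited): best additional pressure from this state, none = no
-- continuation reaches time 30
def pvDfs (graph : List (String × List String)) (flow : List (String × Int))
    (v : String) (t : Int) (vis : PySem.Set String) : Option Int :=
  if 30 ≤ t then some 0
  else pvDfsLoop graph flow (((PySem.Dict.mk graph).get? v).getD []) t vis none
termination_by (2 * (30 - t).toNat + 1, 0)

-- the 'for w in graph.get(valve, [])' loop of Source B, with its 'best' accumulator;
-- the leading 'if 30 ≤ t' is only a totality guard: pvDfsLoop is applied only with t < 30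
def pvDfsLoop (graph : List (String × List String)) (flow : List (String × Int))
    (ws : List String) (t : Int) (vis : PySem.Set String) (best : Option Int) : Option Int :=
  if 30 ≤ t then best
  else match ws with
  | [] => best
  | w :: rest =>
    if PySem.Set.contains vis w then pvDfsLoop graph flow rest t vis best
    else match pvDfs graph flow w (t + 2) (PySem.Set.add vis w) with
      | none => pvDfsLoop graph flow rest t vis best
      | some sub =>
        pvDfsLoop graph flow rest t vis
          (match best with
           | none => some ((30 - t - 1) * ((PySem.Dict.mk flow).getD w 0) + sub)
           | some b =>
             if b < (30 - t - 1) * ((PySem.Dict.mk flow).getD w 0) + sub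
             then some ((30 - t - 1) * ((PySem.Dict.mk flow).getD w 0) + sub) else some b)
termination_by (2 * (30 - t).toNat, ws.length)
end

def find_max_pressure_alt (graph : List (String × List String)) (flow_rates : List (String × Int)) : Int :=
  match pvDfs graph flow_rates "AA" 0 PySem.Set.empty with
  | none => 0
  | some r => max 0 r

-- ===== PRECONDITION & SPEC =====
-- valves reachable from "AA" in at most n edge steps (A only expands states up to 14 steps)
def pvStep (graph : List (String × List String)) (s : PySem.Set String) : PySem.Set String :=
  s.foldl (fun acc v => (((PySem.Dict.mk graph).get? v).getD []).foldl PySem.Set.add acc) s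

def pvReach (graph : List (String × List String)) : Nat → PySem.Set String
  | 0 => ["AA"]
  | n + 1 => pvStep graph (pvReach graph n)

-- Pre_ excludes exactly the inputs on which Python A raises KeyError: some valve listed as
-- a neighbour of a vertex reachable from 'AA' within 14 steps has no entry in flow_rates
-- (A looks up flow_rates[w] for every neighbour w of every state it pops before time 30).
def Pre_find_max_pressure (graph : List (String × List String)) (flow_rates : List (String × Int)) : Prop :=
  ((pvReach graph 14).all (fun v =>
    (((PySem.Dict.mk graph).get? v).getD []).all (fun w =>
      (PySem.Dict.mk flow_rates).contains w))) = true
instance (graph : List (String × List String)) (flow_rates : List (String × Int)) : Decidable (Pre_find_max_pressure graph flow_rates) := by unfold Pre_find_max_pressure; infer_instance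

def pvWitness_find_max_pressure : (List (String × List String)) × (List (String × Int)) :=
  ([("AA", ["BB"]), ("BB", ["AA"])], [("AA", 0), ("BB", 13)])

def Spec_find_max_pressure (graph : List (String × List String)) (flow_rates : List (String × Int)) (out : Int) : Prop := out = find_max_pressure_alt graph flow_rates
instance (graph : List (String × List String)) (flow_rates : List (String × Int)) (out : Int) : Decidable (Spec_find_max_pressure graph flow_rates out) := by unfold Spec_find_max_pressure; infer_instance

-- ===== CLAIM (what is proved, stated in full; the proofs are below) =====
def Claim_equal_find_max_pressure : Prop := ∀ (graph : List (String × List String)) (flow_rates : List (String × Int)), Dom_find_max_pressure graph flow_rates → Pre_find_max_pressure graph flow_rates → Spec_find_max_pressure graph flow_rates (find_max_pressure graph flow_rates)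

-- ===== LEMMAS AND PROOFS =====

-- max of two optional values (none = no terminal state reachable)
def pvMerge : Option Int → Option Int → Option Int
  | none, b => b
  | some a, none => some a
  | some a, some b => some (max a b)

-- value of a queue state: its pressure plus the best completion from it
def pvQVal (graph : List (String × List String)) (flow : List (String × Int)) (s : PvSt) : Option Int :=
  (pvDfs graph flow s.2.1 s.2.2.1 s.2.2.2).map (fun x => -s.1 + x)

def pvQMax (graph : List (String × List String)) (flow : List (String × Int)) (q : List PvSt) : Option Int :=
  q.foldr (fun s acc => pvMerge (pvQVal graph flow s) acc) none

-- combined value of the children a state of pressure p, time t pushes for neighbours ws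
def pvChildVal (graph : List (String × List String)) (flow : List (String × Int))
    (p t : Int) (vis : PySem.Set String) : List String → Option Int
  | [] => none
  | w :: rest =>
    if PySem.Set.contains vis w then pvChildVal graph flow p t vis rest
    else pvMerge
      (pvQVal graph flow (-(p + (30 - t - 1) * ((PySem.Dict.mk flow).getD w 0)), w, t + 2,
                          PySem.Set.add vis w))
      (pvChildVal graph flow p t vis rest)

def pvRes (best : Int) : Option Int → Int
  | none => best
  | some m => max best m

theorem pvMerge_none_right (a : Option Int) : pvMerge a none = a := by
  cases a <;> rfl

theorem pvMerge_comm (a b : Option Int) : pvMerge a b = pvMerge b a := by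
  cases a <;> cases b <;> simp [pvMerge, max_comm]

theorem pvMerge_assoc (a b c : Option Int) :
    pvMerge (pvMerge a b) c = pvMerge a (pvMerge b c) := by
  cases a <;> cases b <;> cases c <;> simp [pvMerge, max_assoc]

theorem pvMerge_left_comm (a b c : Option Int) :
    pvMerge a (pvMerge b c) = pvMerge b (pvMerge a c) := by
  rw [← pvMerge_assoc, pvMerge_comm a b, pvMerge_assoc]

theorem pvQMax_push (graph : List (String × List String)) (flow : List (String × Int))
    (q : List PvSt) (c : PvSt) :
    pvQMax graph flow (pvHeapPush q c) = pvMerge (pvQVal graph flow c) (pvQMax graph flow q) := by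
  induction q with
  | nil => rfl
  | cons x xs ih =>
    simp only [pvHeapPush]
    split
    · rfl
    · simp only [pvQMax, List.foldr_cons] at ih ⊢
      rw [ih, pvMerge_left_comm]

theorem pvQMax_pushChildren (graph : List (String × List String)) (flow : List (String × Int))
    (p t : Int) (vis : PySem.Set String) (ws : List String) (q : List PvSt) :
    pvQMax graph flow (pvPushChildren flow p t vis ws q)
      = pvMerge (pvChildVal graph flow p t vis ws) (pvQMax graph flow q) := by
  induction ws generalizing q with
  | nil => simp [pvPushChildren, pvChildVal, pvMerge]
  | cons w rest ih =>
    simp only [pvPushChildren, List.foldl_cons, pvChildVal] at ih ⊢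
    split
    · exact ih q
    · rw [ih, pvQMax_push]
      simp only [pvMerge_comm, pvMerge_left_comm]

theorem pvDfsLoop_val (graph : List (String × List String)) (flow : List (String × Int))
    (p t : Int) (vis : PySem.Set String) (h : ¬ 30 ≤ t) (ws : List String) (acc : Option Int) :
    (pvDfsLoop graph flow ws t vis acc).map (fun x => p + x)
      = pvMerge (acc.map (fun x => p + x)) (pvChildVal graph flow p t vis ws) := by
  induction ws generalizing acc with
  | nil =>
    rw [pvDfsLoop, if_neg h, pvChildVal, pvMerge_none_right]
  | cons w rest ih =>
    rw [pvDfsLoop, if_neg h]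
    simp only [pvChildVal]
    split
    · exact ih acc
    · rcases hsub : pvDfs graph flow w (t + 2) (PySem.Set.add vis w) with _ | sub
      · simp only [pvQVal, hsub, Option.map_none]
        rw [ih acc]
        rfl
      · rw [ih]
        have hq : pvQVal graph flow
            (-(p + (30 - t - 1) * ((PySem.Dict.mk flow).getD w 0)), w, t + 2, PySem.Set.add vis w)
            = some (p + ((30 - t - 1) * ((PySem.Dict.mk flow).getD w 0) + sub)) := by
          simp only [pvQVal, hsub, Option.map_some]
          congr 1
          ring
        rw [hq]
        rcases acc with _ | b
        · rfl
        · rw [← pvMerge_assoc]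
          congr 1
          simp only [pvMerge]
          split_ifs with hlt <;> simp only [Option.map_some] <;> congr 1 <;>
            rw [max_def] <;> split_ifs <;> omega

theorem pvQVal_nonterminal (graph : List (String × List String)) (flow : List (String × Int))
    (negp v t vis) (h : ¬ 30 ≤ t) :
    pvQVal graph flow (negp, v, t, vis)
      = pvChildVal graph flow (-negp) t vis (((PySem.Dict.mk graph).get? v).getD []) := by
  simp only [pvQVal]
  rw [pvDfs, if_neg h]
  rw [pvDfsLoop_val graph flow (-negp) t vis h]
  rfl

theorem pvLoopA_inv (graph : List (String × List String)) (flow : List (String × Int))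
    (best : Int) (queue : List PvSt) :
    pvLoopA graph flow best queue = pvRes best (pvQMax graph flow queue) := by
  induction best, queue using pvLoopA.induct graph flow with
  | case1 best => rw [pvLoopA]; rfl
  | case2 best negp v t vis rest h ih =>
    rw [pvLoopA, if_pos h, ih]
    have hv : pvQVal graph flow (negp, v, t, vis) = some (-negp) := by
      simp only [pvQVal]
      rw [pvDfs, if_pos h]
      simp
    simp only [pvQMax, List.foldr_cons, hv]
    rcases hrest : (rest.foldr (fun s acc => pvMerge (pvQVal graph flow s) acc) none) with _ | m
    · rfl
    · simp only [pvMerge, pvRes, max_assoc]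
  | case3 best negp v t vis rest h ih =>
    rw [pvLoopA, if_neg h, ih]
    have : pvQMax graph flow ((negp, v, t, vis) :: rest)
        = pvMerge (pvQVal graph flow (negp, v, t, vis)) (pvQMax graph flow rest) := rfl
    rw [this, pvQVal_nonterminal graph flow negp v t vis h, ← pvQMax_pushChildren]

-- ===== VERDICT (by name: the statement is the Claim_ definition above) =====
theorem find_max_pressure_spec : Claim_equal_find_max_pressure := by
  intro graph flow_rates _dom _pre
  unfold Spec_find_max_pressure find_max_pressure find_max_pressure_alt
  rw [pvLoopA_inv]
  have : pvQMax graph flow_rates [(0, "AA", 0, PySem.Set.empty)]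
      = (pvDfs graph flow_rates "AA" 0 PySem.Set.empty).map (fun x => -(0:Int) + x) := by
    simp [pvQMax, pvQVal, pvMerge_none_right]
  rw [this]
  rcases pvDfs graph flow_rates "AA" 0 PySem.Set.empty with _ | r
  · rfl
  · simp [pvRes]
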